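-- pv_equiv track=rewrite | github.com/lenardrommel/fdx | fdx/utils.py | to_long_index
-- ===== SOURCE A (Python) =====
-- from typing import List, Sequence, Tuple
--
-- def to_long_index(idx: Sequence[int], shape: Sequence[int]) -> int:
--     """Convert an N-D index to a flattened (row-major) index.
--
--     Parameters
--     ----------
--     idx
--         N-D index tuple.
--     shape
--         N-D array shape.
--
--     Returns
--     -------
--     int
--         Flattened index corresponding to `idx`.
--     """
--     ndims = len(shape)
--     long_idx = 0
--     siz = 1
--     for axis in range(ndims):
--         idx_ = idx[ndims - 1 - axis]
--         long_idx += idx_ * siz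
--         siz *= shape[ndims - 1 - axis]
--     return long_idx
-- ===== SOURCE B (Python) =====
-- def to_long_index(idx, shape):
--     """Convert an N-D index to a flattened (row-major) index.
--
--     Horner's method: a single forward pass with one multiply-accumulate
--     accumulator, no separate running stride product.
--     """
--     long_idx = 0
--     for axis in range(len(shape)):
--         long_idx = long_idx * shape[axis] + idx[axis]
--     return long_idx
-- ===== Notes on version B (the rewrite author's own statement) =====
-- stated objective: simpler
-- what changed: Replaces A's right-to-left loop that maintains a running stride product alongside the sum with a single forward Horner pass keeping one multiply-accumulate accumulator.
import Mathlib
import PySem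

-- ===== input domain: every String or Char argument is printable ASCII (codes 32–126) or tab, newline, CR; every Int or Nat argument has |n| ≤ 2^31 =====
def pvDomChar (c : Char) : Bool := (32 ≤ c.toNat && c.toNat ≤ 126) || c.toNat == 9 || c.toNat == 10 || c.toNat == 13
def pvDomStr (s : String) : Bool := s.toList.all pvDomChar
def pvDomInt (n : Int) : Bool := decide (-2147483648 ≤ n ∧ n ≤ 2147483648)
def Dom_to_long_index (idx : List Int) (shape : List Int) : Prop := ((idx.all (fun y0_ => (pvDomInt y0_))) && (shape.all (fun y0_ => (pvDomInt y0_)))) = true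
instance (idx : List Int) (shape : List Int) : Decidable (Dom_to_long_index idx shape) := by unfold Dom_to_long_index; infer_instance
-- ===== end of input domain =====

-- B replaces A's right-to-left stride-accumulation loop by a single forward
-- Horner pass (one multiply-accumulate accumulator); simpler, same O(n) cost.


-- ===== PORT A =====
-- for axis in range(ndims): idx_ = idx[ndims-1-axis]; long_idx += idx_*siz; siz *= shape[ndims-1-axis]
-- (pyGetD with default 0: Pre_ guarantees every access is in range, exactly where Python A returns)
def to_long_index (idx : List Int) (shape : List Int) : Int :=
  let ndims : Int := (shape.length : Int)
  let st :=
    (PySem.List.pyRange 0 ndims 1).foldl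
      (fun (st : Int × Int) axis =>
        let idx_ := PySem.List.pyGetD idx (ndims - 1 - axis) 0
        (st.1 + idx_ * st.2, st.2 * PySem.List.pyGetD shape (ndims - 1 - axis) 0))
      (0, 1)
  st.1

-- ===== PORT B =====
-- for axis in range(len(shape)): long_idx = long_idx * shape[axis] + idx[axis]
def to_long_index_alt (idx : List Int) (shape : List Int) : Int :=
  (PySem.List.pyRange 0 ((shape.length : Int)) 1).foldl
    (fun long_idx axis =>
      long_idx * PySem.List.pyGetD shape axis 0 + PySem.List.pyGetD idx axis 0)
    0

-- ===== PRECONDITION & SPEC =====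
-- Pre_ excludes exactly the inputs where Python A raises IndexError: idx shorter than shape
-- (both loops read idx[0..len(shape)-1]; B raises there as well).
def Pre_to_long_index (idx : List Int) (shape : List Int) : Prop := shape.length ≤ idx.length
instance (idx : List Int) (shape : List Int) : Decidable (Pre_to_long_index idx shape) := by unfold Pre_to_long_index; infer_instance

def pvWitness_to_long_index : List Int × List Int := ([1, 2, 3], [4, 5, 6])

def Spec_to_long_index (idx : List Int) (shape : List Int) (out : Int) : Prop := out = to_long_index_alt idx shape
instance (idx : List Int) (shape : List Int) (out : Int) : Decidable (Spec_to_long_index idx shape out) := by unfold Spec_to_long_index; infer_instance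

-- ===== CLAIM (what is proved, stated in full; the proofs are below) =====
def Claim_equal_to_long_index : Prop := ∀ (idx : List Int) (shape : List Int), Dom_to_long_index idx shape → Pre_to_long_index idx shape → Spec_to_long_index idx shape (to_long_index idx shape)

-- ===== LEMMAS AND PROOFS =====

-- shared characterisation: (flat index, total stride) by structural recursion on the two lists
def pvHP : List Int → List Int → Int × Int
  | i :: itl, d :: tl => ((pvHP itl tl).1 + i * (pvHP itl tl).2, (pvHP itl tl).2 * d)
  | _, _ => (0, 1)

theorem pvGetD_cons_pos {x : Int} {xs : List Int} {m : Int} (h : 1 ≤ m) :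
    PySem.List.pyGetD (x :: xs) m 0 = PySem.List.pyGetD xs (m - 1) 0 := by
  rw [PySem.List.pyGetD_of_nonneg _ _ (by omega), PySem.List.pyGetD_of_nonneg _ _ (by omega)]
  have hm : m.toNat = (m - 1).toNat + 1 := by omega
  rw [hm]
  rfl

theorem pvLemA : ∀ (shape idx : List Int), shape.length ≤ idx.length →
    (List.range shape.length).foldl
      (fun (st : Int × Int) (k : Nat) =>
        (st.1 + PySem.List.pyGetD idx ((shape.length : Int) - 1 - (k : Int)) 0 * st.2,
         st.2 * PySem.List.pyGetD shape ((shape.length : Int) - 1 - (k : Int)) 0))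
      (0, 1) = pvHP idx shape := by
  intro shape
  induction shape with
  | nil => intro idx _; cases idx <;> simp [pvHP]
  | cons d tl ih =>
    intro idx hlen
    cases idx with
    | nil => simp at hlen
    | cons i itl =>
      have hlen' : tl.length ≤ itl.length := by simpa using hlen
      rw [show (d :: tl).length = tl.length + 1 from rfl, List.range_succ, List.foldl_append]
      have hidx : ∀ k, k ∈ List.range tl.length →
          ((PySem.List.pyGetD (i :: itl) (((tl.length + 1 : Nat) : Int) - 1 - (k : Int)) 0)
            = PySem.List.pyGetD itl ((tl.length : Int) - 1 - (k : Int)) 0) ∧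
          ((PySem.List.pyGetD (d :: tl) (((tl.length + 1 : Nat) : Int) - 1 - (k : Int)) 0)
            = PySem.List.pyGetD tl ((tl.length : Int) - 1 - (k : Int)) 0) := by
        intro k hk
        have hk' : k < tl.length := List.mem_range.mp hk
        constructor <;>
        · rw [pvGetD_cons_pos (by push_cast; omega)]
          congr 1
          push_cast; ring
      have hfold :
          (List.range tl.length).foldl
            (fun (st : Int × Int) (k : Nat) =>
              (st.1 + PySem.List.pyGetD (i :: itl) (((tl.length + 1 : Nat) : Int) - 1 - (k : Int)) 0 * st.2,
               st.2 * PySem.List.pyGetD (d :: tl) (((tl.length + 1 : Nat) : Int) - 1 - (k : Int)) 0))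
            (0, 1)
          = (List.range tl.length).foldl
            (fun (st : Int × Int) (k : Nat) =>
              (st.1 + PySem.List.pyGetD itl ((tl.length : Int) - 1 - (k : Int)) 0 * st.2,
               st.2 * PySem.List.pyGetD tl ((tl.length : Int) - 1 - (k : Int)) 0))
            (0, 1) := by
        apply PySem.List.foldl_congr_mem
        intro st k hk
        rw [(hidx k hk).1, (hidx k hk).2]
      rw [hfold, ih itl hlen']
      have h0 : ((tl.length + 1 : Nat) : Int) - 1 - ((tl.length : Nat) : Int) = 0 := by push_cast; ring
      simp only [List.foldl_cons, List.foldl_nil, h0, pvHP]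
      rw [PySem.List.pyGetD_of_nonneg _ _ le_rfl, PySem.List.pyGetD_of_nonneg _ _ le_rfl]
      rfl

theorem pvLemB : ∀ (shape idx : List Int) (acc : Int), shape.length ≤ idx.length →
    (List.range shape.length).foldl
      (fun (acc : Int) (k : Nat) =>
        acc * PySem.List.pyGetD shape (k : Int) 0 + PySem.List.pyGetD idx (k : Int) 0)
      acc = acc * (pvHP idx shape).2 + (pvHP idx shape).1 := by
  intro shape
  induction shape with
  | nil => intro idx acc _; cases idx <;> simp [pvHP]
  | cons d tl ih =>
    intro idx acc hlen
    cases idx with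
    | nil => simp at hlen
    | cons i itl =>
      have hlen' : tl.length ≤ itl.length := by simpa using hlen
      rw [show (d :: tl).length = tl.length + 1 from rfl, List.range_succ_eq_map, List.foldl_cons, List.foldl_map]
      have hfold :
          (List.range tl.length).foldl
            (fun (acc : Int) (k : Nat) =>
              acc * PySem.List.pyGetD (d :: tl) ((k + 1 : Nat) : Int) 0
                + PySem.List.pyGetD (i :: itl) ((k + 1 : Nat) : Int) 0)
            (acc * PySem.List.pyGetD (d :: tl) ((0 : Nat) : Int) 0
              + PySem.List.pyGetD (i :: itl) ((0 : Nat) : Int) 0)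
          = (List.range tl.length).foldl
            (fun (acc : Int) (k : Nat) =>
              acc * PySem.List.pyGetD tl (k : Int) 0 + PySem.List.pyGetD itl (k : Int) 0)
            (acc * d + i) := by
        rw [show (acc * PySem.List.pyGetD (d :: tl) ((0 : Nat) : Int) 0
              + PySem.List.pyGetD (i :: itl) ((0 : Nat) : Int) 0) = acc * d + i by
          simp [PySem.List.pyGetD_of_nonneg]]
        apply PySem.List.foldl_congr_mem
        intro a k hk
        rw [pvGetD_cons_pos (m := ((k + 1 : Nat) : Int)) (by push_cast; omega),
            pvGetD_cons_pos (m := ((k + 1 : Nat) : Int)) (by push_cast; omega)]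
        congr 2 <;> push_cast <;> ring_nf
      rw [hfold, ih itl (acc * d + i) hlen']
      simp only [pvHP]
      ring

-- ===== VERDICT (by name: the statement is the Claim_ definition above) =====
theorem to_long_index_spec : Claim_equal_to_long_index := by
  intro idx shape _ hpre
  unfold Spec_to_long_index
  simp only [to_long_index, to_long_index_alt]
  rw [PySem.List.pyRange_one, List.foldl_map, List.foldl_map]
  simp only [zero_add, Int.sub_zero, Int.toNat_natCast]
  have hA := pvLemA shape idx hpre
  have hB := pvLemB shape idx 0 hpre
  simp only [zero_mul, zero_add] at hB
  rw [hA, hB]
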